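-- pv_equiv track=rewrite | github.com/JawadKotaichh/Codeforces | Divisions/Div 3 957/A.py | Only
-- ===== SOURCE A (Python) =====
-- def Only(a,b,c):
--     L=[a,b,c]
--     L.sort()
--     count=5
--     if L[0]!=L[1]:
--         if L[1]-L[0]<=5:
--             count-=L[1]-L[0]
--             L[0]=L[1]
--             if count==0:
--                 return L[0]*L[2]*L[1]
--         else:
--             return (L[0]+5)*L[2]*L[1]
--     if L[2]!=L[1]:
--         diff=2*(L[2]-L[1])
--         if count==diff:
--             return L[2]**3
--
--         else:
--             if diff>count:
--                 if count%2==0: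
--                     L[1]+=count//2
--                     L[0]+=count//2
--                     return L[0]*L[2]*L[1]
--                 else:
--                     L[0]+=count//2
--                     L[1]+=count-count//2
--                     return L[0]*L[2]*L[1]
--             else:
--                 count-=diff
--                 L[0]=L[2]
--                 L[1]=L[2]
--                 if count==0:
--                     return L[0]*L[2]*L[1]
--                 else:
--                     x=0
--                     while count!=0:
--                         count-=1
--                         L[x]+=1
--                         x+=1
--                         if x==3:
--                             x=0
--                     return L[0]*L[2]*L[1]
--     else:
--         x=0
--         while count!=0:
--             count-=1
--             L[x]+=1
--             x+=1
--             if x==3: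
--                 x=0
--         return L[0]*L[2]*L[1]
-- ===== SOURCE B (Python) =====
-- def Only(a, b, c):
--     # Direct greedy simulation: distribute the 5 increments one at a time,
--     # each time to (the first occurrence of) the current minimum.
--     L = [a, b, c]
--     for _ in range(5):
--         i = L.index(min(L))
--         L[i] += 1
--     return L[0] * L[1] * L[2]
-- ===== Notes on version B (the rewrite author's own statement) =====
-- stated objective: simpler
-- what changed: Replaces A's sort plus multi-branch case analysis (equalize the two smallest, parity split, round-robin while-loops) by a direct 5-iteration greedy loop that always increments the current minimum and finally returns the product.
import Mathlib
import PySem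

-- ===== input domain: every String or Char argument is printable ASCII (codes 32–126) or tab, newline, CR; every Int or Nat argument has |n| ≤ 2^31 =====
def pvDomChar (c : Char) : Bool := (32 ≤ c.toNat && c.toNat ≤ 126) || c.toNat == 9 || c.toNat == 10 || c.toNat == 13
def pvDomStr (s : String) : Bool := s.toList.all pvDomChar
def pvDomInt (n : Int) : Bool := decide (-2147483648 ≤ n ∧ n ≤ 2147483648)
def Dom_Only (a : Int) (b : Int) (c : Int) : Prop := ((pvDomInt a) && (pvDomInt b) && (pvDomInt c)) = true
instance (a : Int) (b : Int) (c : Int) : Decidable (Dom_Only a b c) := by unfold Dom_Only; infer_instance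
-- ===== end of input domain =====

-- B replaces A's sort + multi-branch case analysis by a direct 5-step greedy loop
-- (increment the current minimum each step); same return value, similar cost (objective: simpler).


-- ===== PORT A =====
-- A's `while count != 0` round-robin loop (x cycles 0,1,2, adding 1 to L[x]); at every
-- call site A's int `count` is nonnegative, so the loop fuel is `count.toNat` (a loop
-- counter, not an index; for negative count Python would loop forever, which A never does).
def rrA : Nat → Nat → Int → Int → Int → Int × Int × Int
  | 0, _, l0, l1, l2 => (l0, l1, l2)
  | n + 1, x, l0, l1, l2 =>
      if x = 0 then rrA n (x + 1) (l0 + 1) l1 l2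
      else if x = 1 then rrA n (x + 1) l0 (l1 + 1) l2
      else rrA n 0 l0 l1 (l2 + 1)

-- A's code from `if L[2]!=L[1]:` on, reached with L = [l0, l1, l2] and the remaining `count`.
def OnlyPhase2 (l0 l1 l2 count : Int) : Int :=
  if l2 ≠ l1 then
    let diff := 2 * (l2 - l1)
    if count = diff then l2 ^ 3
    else if diff > count then
      if PySem.Int.mod count 2 = 0 then
        (l0 + PySem.Int.floordiv count 2) * l2 * (l1 + PySem.Int.floordiv count 2)
      else
        (l0 + PySem.Int.floordiv count 2) * l2 * (l1 + (count - PySem.Int.floordiv count 2))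
    else
      let count' := count - diff
      -- L[0] = L[2]; L[1] = L[2]
      if count' = 0 then l2 * l2 * l2
      else
        let m := rrA count'.toNat 0 l2 l2 l2
        m.1 * m.2.2 * m.2.1
  else
    let m := rrA count.toNat 0 l0 l1 l2
    m.1 * m.2.2 * m.2.1

-- A's body after `L.sort()`, with L = [x, y, z].
def OnlyCore (x y z : Int) : Int :=
  if x ≠ y then
    if y - x ≤ 5 then
      -- count -= L[1]-L[0]; L[0] = L[1]
      if 5 - (y - x) = 0 then y * z * y
      else OnlyPhase2 y y z (5 - (y - x))
    else (x + 5) * z * y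
  else OnlyPhase2 x y z 5

def Only (a : Int) (b : Int) (c : Int) : Int :=
  match PySem.List.sorted [a, b, c] (fun v => v) false with
  | [x, y, z] => OnlyCore x y z
  | _ => 0  -- unreachable: sorting keeps the length 3

-- ===== PORT B =====
-- one iteration of B's loop body: i = L.index(min(L)); L[i] += 1
def gStep (L : List Int) : List Int :=
  match PySem.List.min? L (fun v => v) with
  | none => L
  | some m =>
    match PySem.List.index? L m with
    | none => L
    | some i => PySem.List.pySetD L (i : Int) (PySem.List.pyGetD L (i : Int) 0 + 1)

def Only_alt (a : Int) (b : Int) (c : Int) : Int :=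
  let L := (PySem.List.pyRange 0 5 1).foldl (fun L _ => gStep L) [a, b, c]
  PySem.List.pyGetD L 0 0 * PySem.List.pyGetD L 1 0 * PySem.List.pyGetD L 2 0

-- ===== PRECONDITION & SPEC =====
def Spec_Only (a : Int) (b : Int) (c : Int) (out : Int) : Prop := out = Only_alt a b c
instance (a : Int) (b : Int) (c : Int) (out : Int) : Decidable (Spec_Only a b c out) := by unfold Spec_Only; infer_instance

-- ===== CLAIM (what is proved, stated in full; the proofs are below) =====
def Claim_equal_Only : Prop := ∀ (a : Int) (b : Int) (c : Int), Dom_Only a b c → Spec_Only a b c (Only a b c)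

-- ===== LEMMAS AND PROOFS =====

-- proof-side helpers: B's greedy step as a function on triples, its sorted normal form,
-- a triple sorter and the 3-product
def stepT (t : Int × Int × Int) : Int × Int × Int :=
  if t.1 ≤ t.2.1 ∧ t.1 ≤ t.2.2 then (t.1 + 1, t.2.1, t.2.2)
  else if t.2.1 ≤ t.2.2 then (t.1, t.2.1 + 1, t.2.2)
  else (t.1, t.2.1, t.2.2 + 1)

def sStep (t : Int × Int × Int) : Int × Int × Int :=
  if t.1 < t.2.1 then (t.1 + 1, t.2.1, t.2.2)
  else if t.2.1 < t.2.2 then (t.1, t.2.1 + 1, t.2.2)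
  else (t.1, t.2.1, t.2.2 + 1)

def canon (t : Int × Int × Int) : Int × Int × Int :=
  if t.1 ≤ t.2.1 then
    (if t.2.1 ≤ t.2.2 then (t.1, t.2.1, t.2.2)
     else if t.1 ≤ t.2.2 then (t.1, t.2.2, t.2.1) else (t.2.2, t.1, t.2.1))
  else
    (if t.1 ≤ t.2.2 then (t.2.1, t.1, t.2.2)
     else if t.2.1 ≤ t.2.2 then (t.2.1, t.2.2, t.1) else (t.2.2, t.2.1, t.1))

def prod3 (t : Int × Int × Int) : Int := t.1 * t.2.1 * t.2.2

-- evaluation lemmas for A's round-robin loop at the five reachable fuels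
lemma rrA1 (a b c : Int) : rrA 1 0 a b c = (a + 1, b, c) := rfl
lemma rrA2 (a b c : Int) : rrA 2 0 a b c = (a + 1, b + 1, c) := rfl
lemma rrA3 (a b c : Int) : rrA 3 0 a b c = (a + 1, b + 1, c + 1) := rfl
lemma rrA4 (a b c : Int) : rrA 4 0 a b c = (a + 1 + 1, b + 1, c + 1) := rfl
lemma rrA5 (a b c : Int) : rrA 5 0 a b c = (a + 1 + 1, b + 1 + 1, c + 1) := rfl

-- branch lemmas for the sorted greedy step
lemma sStepA (a b c : Int) (h : a < b) : sStep (a, b, c) = (a + 1, b, c) := by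
  simp [sStep, h]
lemma sStepB (a b c : Int) (h1 : ¬a < b) (h2 : b < c) : sStep (a, b, c) = (a, b + 1, c) := by
  simp [sStep, h1, h2]
lemma sStepC (a b c : Int) (h1 : ¬a < b) (h2 : ¬b < c) : sStep (a, b, c) = (a, b, c + 1) := by
  simp [sStep, h1, h2]

-- B's list step on a 3-element list: increment the first occurrence of the minimum
lemma gStep_min0 (p q r : Int) (h1 : p ≤ q) (h2 : p ≤ r) : gStep [p, q, r] = [p + 1, q, r] := by
  unfold gStep
  rw [PySem.List.min?_id_cons]
  have hm : [q, r].foldl min p = p := by simp [List.foldl]; omega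
  rw [hm]
  simp only [PySem.List.index?_cons_self]
  simp [PySem.List.pyGetD, PySem.List.pySetD, PySem.List.pySet?, PySem.List.pyIdx?]

lemma gStep_min1 (p q r : Int) (h1 : q < p) (h2 : q ≤ r) : gStep [p, q, r] = [p, q + 1, r] := by
  unfold gStep
  rw [PySem.List.min?_id_cons]
  have hm : [q, r].foldl min p = q := by simp [List.foldl]; omega
  rw [hm]
  simp only [PySem.List.index?_cons_of_ne _ (by omega : p ≠ q), PySem.List.index?_cons_self, Option.map_some]
  simp [PySem.List.pyGetD, PySem.List.pySetD, PySem.List.pySet?, PySem.List.pyIdx?]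

lemma gStep_min2 (p q r : Int) (h1 : r < p) (h2 : r < q) : gStep [p, q, r] = [p, q, r + 1] := by
  unfold gStep
  rw [PySem.List.min?_id_cons]
  have hm : [q, r].foldl min p = r := by simp [List.foldl]; omega
  rw [hm]
  simp only [PySem.List.index?_cons_of_ne _ (by omega : p ≠ r), PySem.List.index?_cons_of_ne _ (by omega : q ≠ r), PySem.List.index?_cons_self, Option.map_some]
  simp [PySem.List.pyGetD, PySem.List.pySetD, PySem.List.pySet?, PySem.List.pyIdx?]

lemma gStep3 (p q r : Int) : gStep [p, q, r] =
    [(stepT (p, q, r)).1, (stepT (p, q, r)).2.1, (stepT (p, q, r)).2.2] := by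
  unfold stepT
  by_cases hc1 : p ≤ q ∧ p ≤ r
  · rw [if_pos hc1, gStep_min0 p q r hc1.1 hc1.2]
  · rw [if_neg hc1]
    by_cases hc2 : q ≤ r
    · rw [if_pos hc2, gStep_min1 p q r (by omega) hc2]
    · rw [if_neg hc2, gStep_min2 p q r (by omega) (by omega)]

-- sorting a triple commutes with the greedy step, and preserves the product
set_option maxHeartbeats 1000000 in
lemma canon_stepT (t : Int × Int × Int) : canon (stepT t) = sStep (canon t) := by
  obtain ⟨p, q, r⟩ := t
  unfold canon stepT sStep
  split_ifs <;> simp_all [Prod.ext_iff] <;> omega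

lemma prod3_canon (t : Int × Int × Int) : prod3 (canon t) = prod3 t := by
  unfold prod3 canon; split_ifs <;> ring

lemma canon_sorted (t : Int × Int × Int) :
    (canon t).1 ≤ (canon t).2.1 ∧ (canon t).2.1 ≤ (canon t).2.2 := by
  unfold canon; split_ifs <;> simp <;> omega

-- Python's sorted on a 3-element list is the triple sorter
lemma sorted3 (a b c : Int) : PySem.List.sorted [a, b, c] (fun v => v) false =
    [(canon (a, b, c)).1, (canon (a, b, c)).2.1, (canon (a, b, c)).2.2] := by
  unfold canon
  split_ifs <;> (dsimp only at *) <;>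
    (apply PySem.List.sorted_id_eq_of_perm_of_pairwise) <;>
    first
      | (simp [List.pairwise_cons]; omega)
      | exact List.Perm.refl _
      | exact List.Perm.cons _ (List.Perm.swap _ _ _)
      | exact List.Perm.swap _ _ _
      | exact (List.Perm.swap _ _ _).trans (List.Perm.cons _ (List.Perm.swap _ _ _))
      | exact (List.Perm.cons _ (List.Perm.swap _ _ _)).trans (List.Perm.swap _ _ _)
      | exact ((List.Perm.swap _ _ _).trans (List.Perm.cons _ (List.Perm.swap _ _ _))).trans (List.Perm.swap _ _ _)

-- B's whole run, as five triple steps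
lemma alt_eq (a b c : Int) :
    Only_alt a b c = prod3 (stepT (stepT (stepT (stepT (stepT (a, b, c)))))) := by
  unfold Only_alt
  have hr : PySem.List.pyRange 0 5 1 = [0, 1, 2, 3, 4] := by decide
  rw [hr]
  simp only [List.foldl, gStep3]
  simp [PySem.List.pyGetD_ofNat', prod3, PySem.List.pyGetD]

-- A's sorted body equals five sorted greedy steps: exhaustive case split on the two gaps
set_option maxHeartbeats 1000000 in
lemma core_eq (x y z : Int) (hxy : x ≤ y) (hyz : y ≤ z) :
    OnlyCore x y z = prod3 (sStep (sStep (sStep (sStep (sStep (x, y, z)))))) := by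
  rcases (by omega : y = x ∨ y = x + 1 ∨ y = x + 2 ∨ y = x + 3 ∨ y = x + 4 ∨ y = x + 5 ∨ x + 6 ≤ y)
    with h | h | h | h | h | h | h <;>
    rcases (by omega : z = y ∨ z = y + 1 ∨ z = y + 2 ∨ y + 3 ≤ z) with hz | hz | hz | hz <;>
    (try subst hz) <;> (try subst h)
  · -- d1 = 0, d2 = 0
    simp only [OnlyCore, OnlyPhase2]
    rw [if_neg (by omega : ¬ ((z : Int) ≠ z))]
    rw [if_neg (by omega : ¬ ((z : Int) ≠ z))]
    rw [show ((5 : Int)).toNat = 5 from rfl]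
    rw [sStepC (z) (z) (z) (by omega) (by omega)]
    rw [sStepB (z) (z) (z + 1) (by omega) (by omega)]
    rw [sStepA (z) (z + 1) (z + 1) (by omega)]
    rw [sStepC (z + 1) (z + 1) (z + 1) (by omega) (by omega)]
    rw [sStepB (z + 1) (z + 1) (z + 1 + 1) (by omega) (by omega)]
    simp only [rrA1, rrA2, rrA3, rrA4, rrA5, prod3]
    try first | ring | omega
  · -- d1 = 0, d2 = 1
    simp only [OnlyCore, OnlyPhase2]
    rw [if_neg (by omega : ¬ ((y : Int) ≠ y))]
    rw [if_pos (by omega : ((y + 1) : Int) ≠ y)]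
    rw [if_neg (by omega : ¬ (5 : Int) = 2 * ((y + 1) - y)), if_neg (by omega : ¬ 2 * (((y + 1) : Int) - y) > 5)]
    rw [if_neg (by omega : ¬ (5 : Int) - 2 * ((y + 1) - y) = 0)]
    rw [show (5 : Int) - 2 * ((y + 1) - y) = 3 from by omega]
    rw [show ((3 : Int)).toNat = 3 from rfl]
    rw [sStepB (y) (y) ((y + 1)) (by omega) (by omega)]
    rw [sStepA (y) (y + 1) ((y + 1)) (by omega)]
    rw [sStepC (y + 1) (y + 1) ((y + 1)) (by omega) (by omega)]
    rw [sStepB (y + 1) (y + 1) ((y + 1) + 1) (by omega) (by omega)]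
    rw [sStepA (y + 1) (y + 1 + 1) ((y + 1) + 1) (by omega)]
    simp only [rrA1, rrA2, rrA3, rrA4, rrA5, prod3]
    try first | ring | omega
  · -- d1 = 0, d2 = 2
    simp only [OnlyCore, OnlyPhase2]
    rw [if_neg (by omega : ¬ ((y : Int) ≠ y))]
    rw [if_pos (by omega : ((y + 2) : Int) ≠ y)]
    rw [if_neg (by omega : ¬ (5 : Int) = 2 * ((y + 2) - y)), if_neg (by omega : ¬ 2 * (((y + 2) : Int) - y) > 5)]
    rw [if_neg (by omega : ¬ (5 : Int) - 2 * ((y + 2) - y) = 0)]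
    rw [show (5 : Int) - 2 * ((y + 2) - y) = 1 from by omega]
    rw [show ((1 : Int)).toNat = 1 from rfl]
    rw [sStepB (y) (y) ((y + 2)) (by omega) (by omega)]
    rw [sStepA (y) (y + 1) ((y + 2)) (by omega)]
    rw [sStepB (y + 1) (y + 1) ((y + 2)) (by omega) (by omega)]
    rw [sStepA (y + 1) (y + 1 + 1) ((y + 2)) (by omega)]
    rw [sStepC (y + 1 + 1) (y + 1 + 1) ((y + 2)) (by omega) (by omega)]
    simp only [rrA1, rrA2, rrA3, rrA4, rrA5, prod3]
    try first | ring | omega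
  · -- d1 = 0, d2 = big
    simp only [OnlyCore, OnlyPhase2]
    rw [if_neg (by omega : ¬ ((y : Int) ≠ y))]
    rw [if_pos (by omega : (z : Int) ≠ y)]
    rw [if_neg (by omega : ¬ (5 : Int) = 2 * (z - y)), if_pos (by omega : 2 * ((z : Int) - y) > 5)]
    rw [if_neg (by decide : ¬ PySem.Int.mod 5 2 = 0)]
    rw [show PySem.Int.floordiv 5 2 = 2 from by decide]
    rw [sStepB (y) (y) (z) (by omega) (by omega)]
    rw [sStepA (y) (y + 1) (z) (by omega)]
    rw [sStepB (y + 1) (y + 1) (z) (by omega) (by omega)]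
    rw [sStepA (y + 1) (y + 1 + 1) (z) (by omega)]
    rw [sStepB (y + 1 + 1) (y + 1 + 1) (z) (by omega) (by omega)]
    simp only [rrA1, rrA2, rrA3, rrA4, rrA5, prod3]
    try first | ring | omega
  · -- d1 = 1, d2 = 0
    simp only [OnlyCore, OnlyPhase2]
    rw [if_pos (by omega : (x : Int) ≠ (x + 1)), if_pos (by omega : ((x + 1) : Int) - x ≤ 5)]
    rw [if_neg (by omega : ¬ (5 : Int) - ((x + 1) - x) = 0)]
    rw [show (5 : Int) - ((x + 1) - x) = 4 from by omega]
    rw [if_neg (by omega : ¬ (((x + 1) : Int) ≠ (x + 1)))]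
    rw [show ((4 : Int)).toNat = 4 from rfl]
    rw [sStepA (x) ((x + 1)) ((x + 1)) (by omega)]
    rw [sStepC (x + 1) ((x + 1)) ((x + 1)) (by omega) (by omega)]
    rw [sStepB (x + 1) ((x + 1)) ((x + 1) + 1) (by omega) (by omega)]
    rw [sStepA (x + 1) ((x + 1) + 1) ((x + 1) + 1) (by omega)]
    rw [sStepC (x + 1 + 1) ((x + 1) + 1) ((x + 1) + 1) (by omega) (by omega)]
    simp only [rrA1, rrA2, rrA3, rrA4, rrA5, prod3]
    try first | ring | omega
  · -- d1 = 1, d2 = 1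
    simp only [OnlyCore, OnlyPhase2]
    rw [if_pos (by omega : (x : Int) ≠ (x + 1)), if_pos (by omega : ((x + 1) : Int) - x ≤ 5)]
    rw [if_neg (by omega : ¬ (5 : Int) - ((x + 1) - x) = 0)]
    rw [show (5 : Int) - ((x + 1) - x) = 4 from by omega]
    rw [if_pos (by omega : (((x + 1) + 1) : Int) ≠ (x + 1))]
    rw [if_neg (by omega : ¬ (4 : Int) = 2 * (((x + 1) + 1) - (x + 1))), if_neg (by omega : ¬ 2 * ((((x + 1) + 1) : Int) - (x + 1)) > 4)]
    rw [if_neg (by omega : ¬ (4 : Int) - 2 * (((x + 1) + 1) - (x + 1)) = 0)]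
    rw [show (4 : Int) - 2 * (((x + 1) + 1) - (x + 1)) = 2 from by omega]
    rw [show ((2 : Int)).toNat = 2 from rfl]
    rw [sStepA (x) ((x + 1)) (((x + 1) + 1)) (by omega)]
    rw [sStepB (x + 1) ((x + 1)) (((x + 1) + 1)) (by omega) (by omega)]
    rw [sStepA (x + 1) ((x + 1) + 1) (((x + 1) + 1)) (by omega)]
    rw [sStepC (x + 1 + 1) ((x + 1) + 1) (((x + 1) + 1)) (by omega) (by omega)]
    rw [sStepB (x + 1 + 1) ((x + 1) + 1) (((x + 1) + 1) + 1) (by omega) (by omega)]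
    simp only [rrA1, rrA2, rrA3, rrA4, rrA5, prod3]
    try first | ring | omega
  · -- d1 = 1, d2 = 2
    simp only [OnlyCore, OnlyPhase2]
    rw [if_pos (by omega : (x : Int) ≠ (x + 1)), if_pos (by omega : ((x + 1) : Int) - x ≤ 5)]
    rw [if_neg (by omega : ¬ (5 : Int) - ((x + 1) - x) = 0)]
    rw [show (5 : Int) - ((x + 1) - x) = 4 from by omega]
    rw [if_pos (by omega : (((x + 1) + 2) : Int) ≠ (x + 1))]
    rw [if_pos (by omega : (4 : Int) = 2 * (((x + 1) + 2) - (x + 1)))]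
    rw [sStepA (x) ((x + 1)) (((x + 1) + 2)) (by omega)]
    rw [sStepB (x + 1) ((x + 1)) (((x + 1) + 2)) (by omega) (by omega)]
    rw [sStepA (x + 1) ((x + 1) + 1) (((x + 1) + 2)) (by omega)]
    rw [sStepB (x + 1 + 1) ((x + 1) + 1) (((x + 1) + 2)) (by omega) (by omega)]
    rw [sStepA (x + 1 + 1) ((x + 1) + 1 + 1) (((x + 1) + 2)) (by omega)]
    simp only [rrA1, rrA2, rrA3, rrA4, rrA5, prod3]
    try first | ring | omega
  · -- d1 = 1, d2 = big
    simp only [OnlyCore, OnlyPhase2]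
    rw [if_pos (by omega : (x : Int) ≠ (x + 1)), if_pos (by omega : ((x + 1) : Int) - x ≤ 5)]
    rw [if_neg (by omega : ¬ (5 : Int) - ((x + 1) - x) = 0)]
    rw [show (5 : Int) - ((x + 1) - x) = 4 from by omega]
    rw [if_pos (by omega : (z : Int) ≠ (x + 1))]
    rw [if_neg (by omega : ¬ (4 : Int) = 2 * (z - (x + 1))), if_pos (by omega : 2 * ((z : Int) - (x + 1)) > 4)]
    rw [if_pos (by decide : PySem.Int.mod 4 2 = 0)]
    rw [show PySem.Int.floordiv 4 2 = 2 from by decide]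
    rw [sStepA (x) ((x + 1)) (z) (by omega)]
    rw [sStepB (x + 1) ((x + 1)) (z) (by omega) (by omega)]
    rw [sStepA (x + 1) ((x + 1) + 1) (z) (by omega)]
    rw [sStepB (x + 1 + 1) ((x + 1) + 1) (z) (by omega) (by omega)]
    rw [sStepA (x + 1 + 1) ((x + 1) + 1 + 1) (z) (by omega)]
    simp only [rrA1, rrA2, rrA3, rrA4, rrA5, prod3]
    try first | ring | omega
  · -- d1 = 2, d2 = 0
    simp only [OnlyCore, OnlyPhase2]
    rw [if_pos (by omega : (x : Int) ≠ (x + 2)), if_pos (by omega : ((x + 2) : Int) - x ≤ 5)]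
    rw [if_neg (by omega : ¬ (5 : Int) - ((x + 2) - x) = 0)]
    rw [show (5 : Int) - ((x + 2) - x) = 3 from by omega]
    rw [if_neg (by omega : ¬ (((x + 2) : Int) ≠ (x + 2)))]
    rw [show ((3 : Int)).toNat = 3 from rfl]
    rw [sStepA (x) ((x + 2)) ((x + 2)) (by omega)]
    rw [sStepA (x + 1) ((x + 2)) ((x + 2)) (by omega)]
    rw [sStepC (x + 1 + 1) ((x + 2)) ((x + 2)) (by omega) (by omega)]
    rw [sStepB (x + 1 + 1) ((x + 2)) ((x + 2) + 1) (by omega) (by omega)]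
    rw [sStepA (x + 1 + 1) ((x + 2) + 1) ((x + 2) + 1) (by omega)]
    simp only [rrA1, rrA2, rrA3, rrA4, rrA5, prod3]
    try first | ring | omega
  · -- d1 = 2, d2 = 1
    simp only [OnlyCore, OnlyPhase2]
    rw [if_pos (by omega : (x : Int) ≠ (x + 2)), if_pos (by omega : ((x + 2) : Int) - x ≤ 5)]
    rw [if_neg (by omega : ¬ (5 : Int) - ((x + 2) - x) = 0)]
    rw [show (5 : Int) - ((x + 2) - x) = 3 from by omega]
    rw [if_pos (by omega : (((x + 2) + 1) : Int) ≠ (x + 2))]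
    rw [if_neg (by omega : ¬ (3 : Int) = 2 * (((x + 2) + 1) - (x + 2))), if_neg (by omega : ¬ 2 * ((((x + 2) + 1) : Int) - (x + 2)) > 3)]
    rw [if_neg (by omega : ¬ (3 : Int) - 2 * (((x + 2) + 1) - (x + 2)) = 0)]
    rw [show (3 : Int) - 2 * (((x + 2) + 1) - (x + 2)) = 1 from by omega]
    rw [show ((1 : Int)).toNat = 1 from rfl]
    rw [sStepA (x) ((x + 2)) (((x + 2) + 1)) (by omega)]
    rw [sStepA (x + 1) ((x + 2)) (((x + 2) + 1)) (by omega)]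
    rw [sStepB (x + 1 + 1) ((x + 2)) (((x + 2) + 1)) (by omega) (by omega)]
    rw [sStepA (x + 1 + 1) ((x + 2) + 1) (((x + 2) + 1)) (by omega)]
    rw [sStepC (x + 1 + 1 + 1) ((x + 2) + 1) (((x + 2) + 1)) (by omega) (by omega)]
    simp only [rrA1, rrA2, rrA3, rrA4, rrA5, prod3]
    try first | ring | omega
  · -- d1 = 2, d2 = 2
    simp only [OnlyCore, OnlyPhase2]
    rw [if_pos (by omega : (x : Int) ≠ (x + 2)), if_pos (by omega : ((x + 2) : Int) - x ≤ 5)]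
    rw [if_neg (by omega : ¬ (5 : Int) - ((x + 2) - x) = 0)]
    rw [show (5 : Int) - ((x + 2) - x) = 3 from by omega]
    rw [if_pos (by omega : (((x + 2) + 2) : Int) ≠ (x + 2))]
    rw [if_neg (by omega : ¬ (3 : Int) = 2 * (((x + 2) + 2) - (x + 2))), if_pos (by omega : 2 * ((((x + 2) + 2) : Int) - (x + 2)) > 3)]
    rw [if_neg (by decide : ¬ PySem.Int.mod 3 2 = 0)]
    rw [show PySem.Int.floordiv 3 2 = 1 from by decide]
    rw [sStepA (x) ((x + 2)) (((x + 2) + 2)) (by omega)]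
    rw [sStepA (x + 1) ((x + 2)) (((x + 2) + 2)) (by omega)]
    rw [sStepB (x + 1 + 1) ((x + 2)) (((x + 2) + 2)) (by omega) (by omega)]
    rw [sStepA (x + 1 + 1) ((x + 2) + 1) (((x + 2) + 2)) (by omega)]
    rw [sStepB (x + 1 + 1 + 1) ((x + 2) + 1) (((x + 2) + 2)) (by omega) (by omega)]
    simp only [rrA1, rrA2, rrA3, rrA4, rrA5, prod3]
    try first | ring | omega
  · -- d1 = 2, d2 = big
    simp only [OnlyCore, OnlyPhase2]
    rw [if_pos (by omega : (x : Int) ≠ (x + 2)), if_pos (by omega : ((x + 2) : Int) - x ≤ 5)]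
    rw [if_neg (by omega : ¬ (5 : Int) - ((x + 2) - x) = 0)]
    rw [show (5 : Int) - ((x + 2) - x) = 3 from by omega]
    rw [if_pos (by omega : (z : Int) ≠ (x + 2))]
    rw [if_neg (by omega : ¬ (3 : Int) = 2 * (z - (x + 2))), if_pos (by omega : 2 * ((z : Int) - (x + 2)) > 3)]
    rw [if_neg (by decide : ¬ PySem.Int.mod 3 2 = 0)]
    rw [show PySem.Int.floordiv 3 2 = 1 from by decide]
    rw [sStepA (x) ((x + 2)) (z) (by omega)]
    rw [sStepA (x + 1) ((x + 2)) (z) (by omega)]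
    rw [sStepB (x + 1 + 1) ((x + 2)) (z) (by omega) (by omega)]
    rw [sStepA (x + 1 + 1) ((x + 2) + 1) (z) (by omega)]
    rw [sStepB (x + 1 + 1 + 1) ((x + 2) + 1) (z) (by omega) (by omega)]
    simp only [rrA1, rrA2, rrA3, rrA4, rrA5, prod3]
    try first | ring | omega
  · -- d1 = 3, d2 = 0
    simp only [OnlyCore, OnlyPhase2]
    rw [if_pos (by omega : (x : Int) ≠ (x + 3)), if_pos (by omega : ((x + 3) : Int) - x ≤ 5)]
    rw [if_neg (by omega : ¬ (5 : Int) - ((x + 3) - x) = 0)]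
    rw [show (5 : Int) - ((x + 3) - x) = 2 from by omega]
    rw [if_neg (by omega : ¬ (((x + 3) : Int) ≠ (x + 3)))]
    rw [show ((2 : Int)).toNat = 2 from rfl]
    rw [sStepA (x) ((x + 3)) ((x + 3)) (by omega)]
    rw [sStepA (x + 1) ((x + 3)) ((x + 3)) (by omega)]
    rw [sStepA (x + 1 + 1) ((x + 3)) ((x + 3)) (by omega)]
    rw [sStepC (x + 1 + 1 + 1) ((x + 3)) ((x + 3)) (by omega) (by omega)]
    rw [sStepB (x + 1 + 1 + 1) ((x + 3)) ((x + 3) + 1) (by omega) (by omega)]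
    simp only [rrA1, rrA2, rrA3, rrA4, rrA5, prod3]
    try first | ring | omega
  · -- d1 = 3, d2 = 1
    simp only [OnlyCore, OnlyPhase2]
    rw [if_pos (by omega : (x : Int) ≠ (x + 3)), if_pos (by omega : ((x + 3) : Int) - x ≤ 5)]
    rw [if_neg (by omega : ¬ (5 : Int) - ((x + 3) - x) = 0)]
    rw [show (5 : Int) - ((x + 3) - x) = 2 from by omega]
    rw [if_pos (by omega : (((x + 3) + 1) : Int) ≠ (x + 3))]
    rw [if_pos (by omega : (2 : Int) = 2 * (((x + 3) + 1) - (x + 3)))]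
    rw [sStepA (x) ((x + 3)) (((x + 3) + 1)) (by omega)]
    rw [sStepA (x + 1) ((x + 3)) (((x + 3) + 1)) (by omega)]
    rw [sStepA (x + 1 + 1) ((x + 3)) (((x + 3) + 1)) (by omega)]
    rw [sStepB (x + 1 + 1 + 1) ((x + 3)) (((x + 3) + 1)) (by omega) (by omega)]
    rw [sStepA (x + 1 + 1 + 1) ((x + 3) + 1) (((x + 3) + 1)) (by omega)]
    simp only [rrA1, rrA2, rrA3, rrA4, rrA5, prod3]
    try first | ring | omega
  · -- d1 = 3, d2 = 2
    simp only [OnlyCore, OnlyPhase2]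
    rw [if_pos (by omega : (x : Int) ≠ (x + 3)), if_pos (by omega : ((x + 3) : Int) - x ≤ 5)]
    rw [if_neg (by omega : ¬ (5 : Int) - ((x + 3) - x) = 0)]
    rw [show (5 : Int) - ((x + 3) - x) = 2 from by omega]
    rw [if_pos (by omega : (((x + 3) + 2) : Int) ≠ (x + 3))]
    rw [if_neg (by omega : ¬ (2 : Int) = 2 * (((x + 3) + 2) - (x + 3))), if_pos (by omega : 2 * ((((x + 3) + 2) : Int) - (x + 3)) > 2)]
    rw [if_pos (by decide : PySem.Int.mod 2 2 = 0)]
    rw [show PySem.Int.floordiv 2 2 = 1 from by decide]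
    rw [sStepA (x) ((x + 3)) (((x + 3) + 2)) (by omega)]
    rw [sStepA (x + 1) ((x + 3)) (((x + 3) + 2)) (by omega)]
    rw [sStepA (x + 1 + 1) ((x + 3)) (((x + 3) + 2)) (by omega)]
    rw [sStepB (x + 1 + 1 + 1) ((x + 3)) (((x + 3) + 2)) (by omega) (by omega)]
    rw [sStepA (x + 1 + 1 + 1) ((x + 3) + 1) (((x + 3) + 2)) (by omega)]
    simp only [rrA1, rrA2, rrA3, rrA4, rrA5, prod3]
    try first | ring | omega
  · -- d1 = 3, d2 = big
    simp only [OnlyCore, OnlyPhase2]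
    rw [if_pos (by omega : (x : Int) ≠ (x + 3)), if_pos (by omega : ((x + 3) : Int) - x ≤ 5)]
    rw [if_neg (by omega : ¬ (5 : Int) - ((x + 3) - x) = 0)]
    rw [show (5 : Int) - ((x + 3) - x) = 2 from by omega]
    rw [if_pos (by omega : (z : Int) ≠ (x + 3))]
    rw [if_neg (by omega : ¬ (2 : Int) = 2 * (z - (x + 3))), if_pos (by omega : 2 * ((z : Int) - (x + 3)) > 2)]
    rw [if_pos (by decide : PySem.Int.mod 2 2 = 0)]
    rw [show PySem.Int.floordiv 2 2 = 1 from by decide]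
    rw [sStepA (x) ((x + 3)) (z) (by omega)]
    rw [sStepA (x + 1) ((x + 3)) (z) (by omega)]
    rw [sStepA (x + 1 + 1) ((x + 3)) (z) (by omega)]
    rw [sStepB (x + 1 + 1 + 1) ((x + 3)) (z) (by omega) (by omega)]
    rw [sStepA (x + 1 + 1 + 1) ((x + 3) + 1) (z) (by omega)]
    simp only [rrA1, rrA2, rrA3, rrA4, rrA5, prod3]
    try first | ring | omega
  · -- d1 = 4, d2 = 0
    simp only [OnlyCore, OnlyPhase2]
    rw [if_pos (by omega : (x : Int) ≠ (x + 4)), if_pos (by omega : ((x + 4) : Int) - x ≤ 5)]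
    rw [if_neg (by omega : ¬ (5 : Int) - ((x + 4) - x) = 0)]
    rw [show (5 : Int) - ((x + 4) - x) = 1 from by omega]
    rw [if_neg (by omega : ¬ (((x + 4) : Int) ≠ (x + 4)))]
    rw [show ((1 : Int)).toNat = 1 from rfl]
    rw [sStepA (x) ((x + 4)) ((x + 4)) (by omega)]
    rw [sStepA (x + 1) ((x + 4)) ((x + 4)) (by omega)]
    rw [sStepA (x + 1 + 1) ((x + 4)) ((x + 4)) (by omega)]
    rw [sStepA (x + 1 + 1 + 1) ((x + 4)) ((x + 4)) (by omega)]
    rw [sStepC (x + 1 + 1 + 1 + 1) ((x + 4)) ((x + 4)) (by omega) (by omega)]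
    simp only [rrA1, rrA2, rrA3, rrA4, rrA5, prod3]
    try first | ring | omega
  · -- d1 = 4, d2 = 1
    simp only [OnlyCore, OnlyPhase2]
    rw [if_pos (by omega : (x : Int) ≠ (x + 4)), if_pos (by omega : ((x + 4) : Int) - x ≤ 5)]
    rw [if_neg (by omega : ¬ (5 : Int) - ((x + 4) - x) = 0)]
    rw [show (5 : Int) - ((x + 4) - x) = 1 from by omega]
    rw [if_pos (by omega : (((x + 4) + 1) : Int) ≠ (x + 4))]
    rw [if_neg (by omega : ¬ (1 : Int) = 2 * (((x + 4) + 1) - (x + 4))), if_pos (by omega : 2 * ((((x + 4) + 1) : Int) - (x + 4)) > 1)]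
    rw [if_neg (by decide : ¬ PySem.Int.mod 1 2 = 0)]
    rw [show PySem.Int.floordiv 1 2 = 0 from by decide]
    rw [sStepA (x) ((x + 4)) (((x + 4) + 1)) (by omega)]
    rw [sStepA (x + 1) ((x + 4)) (((x + 4) + 1)) (by omega)]
    rw [sStepA (x + 1 + 1) ((x + 4)) (((x + 4) + 1)) (by omega)]
    rw [sStepA (x + 1 + 1 + 1) ((x + 4)) (((x + 4) + 1)) (by omega)]
    rw [sStepB (x + 1 + 1 + 1 + 1) ((x + 4)) (((x + 4) + 1)) (by omega) (by omega)]
    simp only [rrA1, rrA2, rrA3, rrA4, rrA5, prod3]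
    try first | ring | omega
  · -- d1 = 4, d2 = 2
    simp only [OnlyCore, OnlyPhase2]
    rw [if_pos (by omega : (x : Int) ≠ (x + 4)), if_pos (by omega : ((x + 4) : Int) - x ≤ 5)]
    rw [if_neg (by omega : ¬ (5 : Int) - ((x + 4) - x) = 0)]
    rw [show (5 : Int) - ((x + 4) - x) = 1 from by omega]
    rw [if_pos (by omega : (((x + 4) + 2) : Int) ≠ (x + 4))]
    rw [if_neg (by omega : ¬ (1 : Int) = 2 * (((x + 4) + 2) - (x + 4))), if_pos (by omega : 2 * ((((x + 4) + 2) : Int) - (x + 4)) > 1)]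
    rw [if_neg (by decide : ¬ PySem.Int.mod 1 2 = 0)]
    rw [show PySem.Int.floordiv 1 2 = 0 from by decide]
    rw [sStepA (x) ((x + 4)) (((x + 4) + 2)) (by omega)]
    rw [sStepA (x + 1) ((x + 4)) (((x + 4) + 2)) (by omega)]
    rw [sStepA (x + 1 + 1) ((x + 4)) (((x + 4) + 2)) (by omega)]
    rw [sStepA (x + 1 + 1 + 1) ((x + 4)) (((x + 4) + 2)) (by omega)]
    rw [sStepB (x + 1 + 1 + 1 + 1) ((x + 4)) (((x + 4) + 2)) (by omega) (by omega)]
    simp only [rrA1, rrA2, rrA3, rrA4, rrA5, prod3]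
    try first | ring | omega
  · -- d1 = 4, d2 = big
    simp only [OnlyCore, OnlyPhase2]
    rw [if_pos (by omega : (x : Int) ≠ (x + 4)), if_pos (by omega : ((x + 4) : Int) - x ≤ 5)]
    rw [if_neg (by omega : ¬ (5 : Int) - ((x + 4) - x) = 0)]
    rw [show (5 : Int) - ((x + 4) - x) = 1 from by omega]
    rw [if_pos (by omega : (z : Int) ≠ (x + 4))]
    rw [if_neg (by omega : ¬ (1 : Int) = 2 * (z - (x + 4))), if_pos (by omega : 2 * ((z : Int) - (x + 4)) > 1)]
    rw [if_neg (by decide : ¬ PySem.Int.mod 1 2 = 0)]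
    rw [show PySem.Int.floordiv 1 2 = 0 from by decide]
    rw [sStepA (x) ((x + 4)) (z) (by omega)]
    rw [sStepA (x + 1) ((x + 4)) (z) (by omega)]
    rw [sStepA (x + 1 + 1) ((x + 4)) (z) (by omega)]
    rw [sStepA (x + 1 + 1 + 1) ((x + 4)) (z) (by omega)]
    rw [sStepB (x + 1 + 1 + 1 + 1) ((x + 4)) (z) (by omega) (by omega)]
    simp only [rrA1, rrA2, rrA3, rrA4, rrA5, prod3]
    try first | ring | omega
  · -- d1 = 5, d2 = 0
    simp only [OnlyCore, OnlyPhase2]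
    rw [if_pos (by omega : (x : Int) ≠ (x + 5)), if_pos (by omega : ((x + 5) : Int) - x ≤ 5)]
    rw [if_pos (by omega : (5 : Int) - ((x + 5) - x) = 0)]
    rw [sStepA (x) ((x + 5)) ((x + 5)) (by omega)]
    rw [sStepA (x + 1) ((x + 5)) ((x + 5)) (by omega)]
    rw [sStepA (x + 1 + 1) ((x + 5)) ((x + 5)) (by omega)]
    rw [sStepA (x + 1 + 1 + 1) ((x + 5)) ((x + 5)) (by omega)]
    rw [sStepA (x + 1 + 1 + 1 + 1) ((x + 5)) ((x + 5)) (by omega)]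
    simp only [rrA1, rrA2, rrA3, rrA4, rrA5, prod3]
    try first | ring | omega
  · -- d1 = 5, d2 = 1
    simp only [OnlyCore, OnlyPhase2]
    rw [if_pos (by omega : (x : Int) ≠ (x + 5)), if_pos (by omega : ((x + 5) : Int) - x ≤ 5)]
    rw [if_pos (by omega : (5 : Int) - ((x + 5) - x) = 0)]
    rw [sStepA (x) ((x + 5)) (((x + 5) + 1)) (by omega)]
    rw [sStepA (x + 1) ((x + 5)) (((x + 5) + 1)) (by omega)]
    rw [sStepA (x + 1 + 1) ((x + 5)) (((x + 5) + 1)) (by omega)]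
    rw [sStepA (x + 1 + 1 + 1) ((x + 5)) (((x + 5) + 1)) (by omega)]
    rw [sStepA (x + 1 + 1 + 1 + 1) ((x + 5)) (((x + 5) + 1)) (by omega)]
    simp only [rrA1, rrA2, rrA3, rrA4, rrA5, prod3]
    try first | ring | omega
  · -- d1 = 5, d2 = 2
    simp only [OnlyCore, OnlyPhase2]
    rw [if_pos (by omega : (x : Int) ≠ (x + 5)), if_pos (by omega : ((x + 5) : Int) - x ≤ 5)]
    rw [if_pos (by omega : (5 : Int) - ((x + 5) - x) = 0)]
    rw [sStepA (x) ((x + 5)) (((x + 5) + 2)) (by omega)]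
    rw [sStepA (x + 1) ((x + 5)) (((x + 5) + 2)) (by omega)]
    rw [sStepA (x + 1 + 1) ((x + 5)) (((x + 5) + 2)) (by omega)]
    rw [sStepA (x + 1 + 1 + 1) ((x + 5)) (((x + 5) + 2)) (by omega)]
    rw [sStepA (x + 1 + 1 + 1 + 1) ((x + 5)) (((x + 5) + 2)) (by omega)]
    simp only [rrA1, rrA2, rrA3, rrA4, rrA5, prod3]
    try first | ring | omega
  · -- d1 = 5, d2 = big
    simp only [OnlyCore, OnlyPhase2]
    rw [if_pos (by omega : (x : Int) ≠ (x + 5)), if_pos (by omega : ((x + 5) : Int) - x ≤ 5)]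
    rw [if_pos (by omega : (5 : Int) - ((x + 5) - x) = 0)]
    rw [sStepA (x) ((x + 5)) (z) (by omega)]
    rw [sStepA (x + 1) ((x + 5)) (z) (by omega)]
    rw [sStepA (x + 1 + 1) ((x + 5)) (z) (by omega)]
    rw [sStepA (x + 1 + 1 + 1) ((x + 5)) (z) (by omega)]
    rw [sStepA (x + 1 + 1 + 1 + 1) ((x + 5)) (z) (by omega)]
    simp only [rrA1, rrA2, rrA3, rrA4, rrA5, prod3]
    try first | ring | omega
  · -- d1 = big, d2 = 0
    simp only [OnlyCore, OnlyPhase2]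
    rw [if_pos (by omega : (x : Int) ≠ z), if_neg (by omega : ¬ (z : Int) - x ≤ 5)]
    rw [sStepA (x) (z) (z) (by omega)]
    rw [sStepA (x + 1) (z) (z) (by omega)]
    rw [sStepA (x + 1 + 1) (z) (z) (by omega)]
    rw [sStepA (x + 1 + 1 + 1) (z) (z) (by omega)]
    rw [sStepA (x + 1 + 1 + 1 + 1) (z) (z) (by omega)]
    simp only [rrA1, rrA2, rrA3, rrA4, rrA5, prod3]
    try first | ring | omega
  · -- d1 = big, d2 = 1
    simp only [OnlyCore, OnlyPhase2]
    rw [if_pos (by omega : (x : Int) ≠ y), if_neg (by omega : ¬ (y : Int) - x ≤ 5)]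
    rw [sStepA (x) (y) ((y + 1)) (by omega)]
    rw [sStepA (x + 1) (y) ((y + 1)) (by omega)]
    rw [sStepA (x + 1 + 1) (y) ((y + 1)) (by omega)]
    rw [sStepA (x + 1 + 1 + 1) (y) ((y + 1)) (by omega)]
    rw [sStepA (x + 1 + 1 + 1 + 1) (y) ((y + 1)) (by omega)]
    simp only [rrA1, rrA2, rrA3, rrA4, rrA5, prod3]
    try first | ring | omega
  · -- d1 = big, d2 = 2
    simp only [OnlyCore, OnlyPhase2]
    rw [if_pos (by omega : (x : Int) ≠ y), if_neg (by omega : ¬ (y : Int) - x ≤ 5)]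
    rw [sStepA (x) (y) ((y + 2)) (by omega)]
    rw [sStepA (x + 1) (y) ((y + 2)) (by omega)]
    rw [sStepA (x + 1 + 1) (y) ((y + 2)) (by omega)]
    rw [sStepA (x + 1 + 1 + 1) (y) ((y + 2)) (by omega)]
    rw [sStepA (x + 1 + 1 + 1 + 1) (y) ((y + 2)) (by omega)]
    simp only [rrA1, rrA2, rrA3, rrA4, rrA5, prod3]
    try first | ring | omega
  · -- d1 = big, d2 = big
    simp only [OnlyCore, OnlyPhase2]
    rw [if_pos (by omega : (x : Int) ≠ y), if_neg (by omega : ¬ (y : Int) - x ≤ 5)]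
    rw [sStepA (x) (y) (z) (by omega)]
    rw [sStepA (x + 1) (y) (z) (by omega)]
    rw [sStepA (x + 1 + 1) (y) (z) (by omega)]
    rw [sStepA (x + 1 + 1 + 1) (y) (z) (by omega)]
    rw [sStepA (x + 1 + 1 + 1 + 1) (y) (z) (by omega)]
    simp only [rrA1, rrA2, rrA3, rrA4, rrA5, prod3]
    try first | ring | omega

-- ===== VERDICT (by name: the statement is the Claim_ definition above) =====
theorem Only_spec : Claim_equal_Only := by
  intro a b c _
  unfold Spec_Only
  rw [alt_eq, ← prod3_canon, canon_stepT, canon_stepT, canon_stepT, canon_stepT, canon_stepT]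
  unfold Only
  rw [sorted3]
  exact core_eq _ _ _ (canon_sorted (a, b, c)).1 (canon_sorted (a, b, c)).2
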